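-- pv_equiv track=rewrite | github.com/kra53n/pymin | pymin/analyze.py | parse_local
-- ===== SOURCE A (Python) =====
-- def slice_in_files_extension(files, extension=".py"):
--     l = len(extension)
--     for i in range(len(files)):
--         if files[i][-l:] == extension:
--             files[i] = files[i][:-l]
--
-- def parse_local(pkgs, files):
--     local = []
--     # clean pkgs
--     for i in range(len(pkgs)):
--         if "." in pkgs[i]:
--             pkgs[i] = pkgs[i].replace(".", "")
--
--     slice_in_files_extension(files)
--     [local.append(fl) for fl in files if fl in pkgs]
--     [files.remove(pkg) for pkg in local]
--     return local
-- ===== SOURCE B (Python) =====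
-- def parse_local(pkgs, files):
--     # clean pkgs in place (same observable mutation as A)
--     for i in range(len(pkgs)):
--         if "." in pkgs[i]:
--             pkgs[i] = pkgs[i].replace(".", "")
--     pset = set(pkgs)
--     local = []
--     kept = []
--     # single partition pass: strip ".py" inline, route each name to local or kept
--     for fl in files:
--         name = fl[:-3] if fl.endswith(".py") else fl
--         if name in pset:
--             local.append(name)
--         else:
--             kept.append(name)
--     files[:] = kept
--     return local
-- ===== Notes on version B (the rewrite author's own statement) =====
-- stated objective: faster
-- what changed: Replaced A's three passes (index loop stripping extensions, list-membership filter building local, repeated files.remove scans) with one partition pass over files using a set of cleaned pkgs, writing the kept names back via files[:].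
import Mathlib
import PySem

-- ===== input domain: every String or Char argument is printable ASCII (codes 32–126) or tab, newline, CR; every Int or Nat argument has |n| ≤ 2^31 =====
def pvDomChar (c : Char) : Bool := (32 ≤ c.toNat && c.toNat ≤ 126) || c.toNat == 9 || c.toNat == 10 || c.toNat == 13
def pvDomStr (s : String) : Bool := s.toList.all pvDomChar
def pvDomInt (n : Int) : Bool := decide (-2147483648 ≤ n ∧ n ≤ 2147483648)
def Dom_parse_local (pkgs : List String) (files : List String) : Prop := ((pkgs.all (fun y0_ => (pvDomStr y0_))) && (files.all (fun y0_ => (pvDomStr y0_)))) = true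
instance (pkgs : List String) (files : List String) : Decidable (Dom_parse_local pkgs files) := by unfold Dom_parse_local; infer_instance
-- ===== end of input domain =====

-- B does the same job in one partition pass over files with a set of cleaned pkgs (faster: no repeated
-- list scans). Both A and B mutate pkgs and files in place identically in Python; the equivalence proved
-- here is about the RETURN value only.

-- ===== PORT A =====
-- "." in pkgs[i] / pkgs[i].replace(".", "")
def pvCleanA (p : String) : String :=
  if PySem.Str.isIn "." p then PySem.Str.replace p "." "" else p

-- slice_in_files_extension: files[i][-3:] == ".py" → files[i] = files[i][:-3]  (l = len(".py") = 3)
def pvStripA (f : String) : String :=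
  if PySem.Str.slice f (some (-3)) none == ".py" then PySem.Str.slice f none (some (-3)) else f

def parse_local (pkgs : List String) (files : List String) : List String :=
  let pkgs2 := pkgs.map pvCleanA
  let files2 := files.map pvStripA
  -- [local.append(fl) for fl in files if fl in pkgs]
  let loc := files2.foldl (fun loc fl => if pkgs2.contains fl then loc ++ [fl] else loc) []
  -- [files.remove(pkg) for pkg in local] only mutates files (a side effect); the return value is local
  loc

-- ===== PORT B =====
def parse_local_alt (pkgs : List String) (files : List String) : List String :=
  let pset := PySem.Set.ofList (pkgs.map pvCleanA)
  -- single partition pass: strip ".py" inline, route each name to local or kept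
  let res := files.foldl (fun (acc : List String × List String) fl =>
      let name := if PySem.Str.endswith fl ".py" then PySem.Str.slice fl none (some (-3)) else fl
      if PySem.Set.contains pset name then (acc.1 ++ [name], acc.2) else (acc.1, acc.2 ++ [name]))
    ([], [])
  -- files[:] = res.2 is a side effect on files; the return value is res.1
  res.1

-- ===== PRECONDITION & SPEC =====
def Spec_parse_local (pkgs : List String) (files : List String) (out : List String) : Prop := out = parse_local_alt pkgs files
instance (pkgs : List String) (files : List String) (out : List String) : Decidable (Spec_parse_local pkgs files out) := by unfold Spec_parse_local; infer_instance

-- ===== CLAIM (what is proved, stated in full; the proofs are below) =====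
def Claim_equal_parse_local : Prop := ∀ (pkgs : List String) (files : List String), Dom_parse_local pkgs files → Spec_parse_local pkgs files (parse_local pkgs files)

-- ===== LEMMAS AND PROOFS =====

-- the two extension tests agree: f[-3:] == ".py"  ↔  f.endswith(".py")
theorem pvStrip_cond_eq (f : String) :
    (PySem.Str.slice f (some (-3)) none == ".py") = PySem.Str.endswith f ".py" := by
  apply Bool.eq_iff_iff.mpr
  rw [beq_iff_eq, ← String.toList_inj, PySem.Str.toList_slice,
      PySem.Chars.slice_eq_listSlice,
      PySem.List.slice_from_neg_ofNat f.toList 3 (by omega),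
      PySem.Str.endswith_eq, PySem.Chars.endswith_iff]
  constructor
  · intro h
    rw [List.suffix_iff_eq_drop]
    simpa using h.symm
  · intro h
    rw [List.suffix_iff_eq_drop] at h
    simpa using h.symm

-- membership in the set of cleaned pkgs is list membership
theorem pvContains_eq (l : List String) (x : String) :
    PySem.Set.contains (PySem.Set.ofList l) x = l.contains x := by
  apply Bool.eq_iff_iff.mpr
  rw [PySem.Set.contains_iff, PySem.Set.mem_ofList, List.contains_iff_mem]

-- fst of B's pair fold equals A's filter-style fold over the pre-mapped list
theorem pvFold_fst (P : String → Bool) (g : String → String) :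
    ∀ (fs : List String) (loc kept : List String),
      (fs.foldl (fun acc fl =>
          let name := g fl
          if P name then (acc.1 ++ [name], acc.2) else (acc.1, acc.2 ++ [name])) (loc, kept)).1
      = (fs.map g).foldl (fun l fl => if P fl then l ++ [fl] else l) loc := by
  intro fs
  induction fs with
  | nil => intro loc kept; rfl
  | cons f fs ih =>
      intro loc kept
      simp only [List.foldl_cons, List.map_cons]
      by_cases h : P (g f) = true
      · simp [h, ih]
      · simp [Bool.eq_false_iff.mpr h, ih]

-- ===== VERDICT (by name: the statement is the Claim_ definition above) =====
theorem parse_local_spec : Claim_equal_parse_local := by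
  intro pkgs files _
  unfold Spec_parse_local parse_local parse_local_alt
  rw [pvFold_fst (fun n => PySem.Set.contains (PySem.Set.ofList (pkgs.map pvCleanA)) n)
        (fun fl => if PySem.Str.endswith fl ".py" then PySem.Str.slice fl none (some (-3)) else fl)
        files [] []]
  have hmap : files.map pvStripA
      = files.map (fun fl => if PySem.Str.endswith fl ".py" then PySem.Str.slice fl none (some (-3)) else fl) := by
    apply List.map_congr_left
    intro f _
    unfold pvStripA
    rw [pvStrip_cond_eq]
  simp only [hmap, pvContains_eq]
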